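-- pv_equiv track=rewrite | github.com/Flamenc/PyTools | smb_recursive.py | get_dir_name
-- ===== SOURCE A (Python) =====
-- def get_dir_name(dir_name):
--     dir_d=""
--     dir_root=dir_name.split(" ")
--     cont=0
--     while cont < len(dir_root):
--         if "" !=dir_root[cont]:
--             if cont != 0:
--                 dir_d=dir_d+" "+dir_root[cont]
--             else:
--                 dir_d=dir_root[cont]
--
--         cont=cont+1
--     return dir_d
-- ===== SOURCE B (Python) =====
-- def get_dir_name(dir_name):
--     # One pass: copy chars, skipping a space whose previously emitted char is a space;
--     # then pop trailing spaces. No split/tokenisation.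
--     out = []
--     for c in dir_name:
--         if c != ' ' or not out or out[-1] != ' ':
--             out.append(c)
--     while out and out[-1] == ' ':
--         out.pop()
--     return ''.join(out)
-- ===== Notes on version B (the rewrite author's own statement) =====
-- stated objective: simpler
-- what changed: Replaces the split-on-space tokenisation plus indexed while-loop re-join with a single character pass that skips a space whenever the last emitted character is a space, then pops trailing spaces.
import Mathlib
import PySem

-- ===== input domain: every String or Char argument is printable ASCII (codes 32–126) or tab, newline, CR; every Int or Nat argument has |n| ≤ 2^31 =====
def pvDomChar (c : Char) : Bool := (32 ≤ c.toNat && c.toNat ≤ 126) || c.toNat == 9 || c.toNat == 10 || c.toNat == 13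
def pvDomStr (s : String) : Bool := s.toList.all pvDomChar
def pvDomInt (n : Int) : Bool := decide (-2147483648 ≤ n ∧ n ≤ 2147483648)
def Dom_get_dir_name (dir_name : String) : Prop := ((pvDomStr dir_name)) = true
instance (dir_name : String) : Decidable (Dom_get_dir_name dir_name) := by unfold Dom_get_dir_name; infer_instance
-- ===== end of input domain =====

-- B collapses runs of spaces in a single character pass (no split/join tokenisation) and pops
-- trailing spaces; objective: simpler one-pass alternative, same observable behaviour.

-- ===== PORT A =====
-- the 'while cont < len(dir_root)' loop: iterate over the token list carrying the counter cont
def aLoop : List (List Char) → Nat → List Char → List Char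
  | [], _, dir_d => dir_d
  | tok :: rest, cont, dir_d =>
      aLoop rest (cont + 1)
        (if tok ≠ [] then (if cont ≠ 0 then dir_d ++ [' '] ++ tok else tok) else dir_d)

def get_dir_name (dir_name : String) : String :=
  String.mk (aLoop (PySem.Chars.splitOn dir_name.toList [' ']) 0 [])

-- ===== PORT B =====
-- the 'for c in dir_name' loop over out
def bLoop : List Char → List Char → List Char
  | [], out => out
  | c :: rest, out =>
      bLoop rest (if c ≠ ' ' ∨ out = [] ∨ out.getLast? ≠ some ' ' then out ++ [c] else out)

-- the 'while out and out[-1] == " ": out.pop()' loop: drop the trailing run of spaces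
def bRstrip (out : List Char) : List Char := (out.reverse.dropWhile (· == ' ')).reverse

def get_dir_name_alt (dir_name : String) : String :=
  String.mk (bRstrip (bLoop dir_name.toList []))

-- ===== PRECONDITION & SPEC =====
def Spec_get_dir_name (dir_name : String) (out : String) : Prop := out = get_dir_name_alt dir_name
instance (dir_name : String) (out : String) : Decidable (Spec_get_dir_name dir_name out) := by unfold Spec_get_dir_name; infer_instance

-- ===== CLAIM (what is proved, stated in full; the proofs are below) =====
def Claim_equal_get_dir_name : Prop := ∀ (dir_name : String), Dom_get_dir_name dir_name → Spec_get_dir_name dir_name (get_dir_name dir_name)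

-- ===== LEMMAS AND PROOFS =====

-- tokens of splitOn on the single-char separator ' ', as (first token, remaining tokens)
def sp1 : List Char → List Char × List (List Char)
  | [] => ([], [])
  | c :: rest => if c = ' ' then ([], (sp1 rest).1 :: (sp1 rest).2)
                 else (c :: (sp1 rest).1, (sp1 rest).2)

theorem go_spec (fuel : Nat) : ∀ (cs cur : List Char) (accl : List (List Char)),
    cs.length < fuel →
    PySem.Chars.splitOn.go [' '] fuel cs cur accl =
      accl.reverse ++ (cur.reverse ++ (sp1 cs).1) :: (sp1 cs).2 := by
  induction fuel with
  | zero => intro cs cur accl h; omega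
  | succ n ih =>
    intro cs cur accl h
    match cs with
    | [] => simp [PySem.Chars.splitOn.go, sp1]
    | c :: rest =>
      rw [PySem.Chars.splitOn.go]
      by_cases hc : c = ' '
      · subst hc
        simp only [List.isPrefixOf, Char.isValue, beq_self_eq_true, List.isPrefixOf_nil_left,
          Bool.and_self, if_true, List.length_cons, List.drop_succ_cons, List.length_nil,
          List.drop_zero]
        rw [ih rest [] (cur.reverse :: accl) (by simp at h; omega)]
        simp [sp1]
      · have hpre : ([' '].isPrefixOf (c :: rest)) = false := by
          simp [List.isPrefixOf]; exact fun h' => (hc h'.symm).elim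
        rw [if_neg (by simp [hpre])]
        rw [ih rest (c :: cur) accl (by simp at h; omega)]
        simp [sp1, hc]

theorem splitOn_eq_sp1 (cs : List Char) :
    PySem.Chars.splitOn cs [' '] = (sp1 cs).1 :: (sp1 cs).2 := by
  rw [PySem.Chars.splitOn, go_spec (cs.length + 1) cs [] [] (by omega)]
  simp

-- what A's loop appends after the first token: a space plus each nonempty token
def F (ts : List (List Char)) : List Char :=
  (ts.filter (fun t => t ≠ [])).flatMap (fun t => ' ' :: t)

theorem aLoop_ne_zero : ∀ (ts : List (List Char)) (cont : Nat) (d : List Char), cont ≠ 0 →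
    aLoop ts cont d = d ++ F ts := by
  intro ts
  induction ts with
  | nil => intro cont d _; simp [aLoop, F]
  | cons t ts ih =>
    intro cont d hc
    rw [show aLoop (t :: ts) cont d
        = aLoop ts (cont + 1)
            (if t ≠ [] then (if cont ≠ 0 then d ++ [' '] ++ t else t) else d) from rfl]
    rw [ih (cont + 1) _ (by omega)]
    by_cases ht : t = []
    · simp [ht, F]
    · simp [ht, hc, F]

theorem aLoop_zero (cs : List Char) :
    aLoop ((sp1 cs).1 :: (sp1 cs).2) 0 [] = (sp1 cs).1 ++ F (sp1 cs).2 := by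
  rw [show aLoop ((sp1 cs).1 :: (sp1 cs).2) 0 []
      = aLoop (sp1 cs).2 1
          (if (sp1 cs).1 ≠ [] then (if (0 : Nat) ≠ 0 then [] ++ [' '] ++ (sp1 cs).1 else (sp1 cs).1)
           else []) from rfl]
  rw [aLoop_ne_zero _ 1 _ (by omega)]
  by_cases ht : (sp1 cs).1 = [] <;> simp [ht]

-- the one-pass collapse, with a flag: was the previously emitted character a space?
def collapse : List Char → Bool → List Char
  | [], _ => []
  | c :: rest, prevSp =>
      if c = ' ' ∧ prevSp then collapse rest prevSp else c :: collapse rest (c == ' ')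

theorem bLoop_eq : ∀ (cs out : List Char),
    bLoop cs out = out ++ collapse cs (out.getLast? == some ' ') := by
  intro cs
  induction cs with
  | nil => intro out; simp [bLoop, collapse]
  | cons c rest ih =>
    intro out
    by_cases hcond : c ≠ ' ' ∨ out = [] ∨ out.getLast? ≠ some ' '
    · have hsk : ¬ (c = ' ' ∧ (out.getLast? == some ' ') = true) := by
        rcases hcond with h | h | h
        · exact fun ⟨h1, _⟩ => h h1
        · subst h; simp
        · exact fun ⟨_, h2⟩ => h (by simpa using h2)
      rw [show bLoop (c :: rest) out
          = bLoop rest (if c ≠ ' ' ∨ out = [] ∨ out.getLast? ≠ some ' ' then out ++ [c] else out) from rfl]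
      rw [if_pos hcond, ih (out ++ [c])]
      simp only [collapse]
      rw [if_neg hsk]
      simp
    · rw [show bLoop (c :: rest) out
          = bLoop rest (if c ≠ ' ' ∨ out = [] ∨ out.getLast? ≠ some ' ' then out ++ [c] else out) from rfl]
      rw [if_neg hcond, ih out]
      push_neg at hcond
      obtain ⟨hc, _, hlast⟩ := hcond
      simp only [collapse]
      rw [if_pos ⟨hc, by simp [hlast]⟩]

theorem bRstrip_cons_ne (c : Char) (xs : List Char) (hc : c ≠ ' ') :
    bRstrip (c :: xs) = c :: bRstrip xs := by
  unfold bRstrip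
  rw [List.reverse_cons, List.dropWhile_append]
  by_cases h : (xs.reverse.dropWhile (· == ' ')) = []
  · simp [h, hc]
  · simp [h, List.isEmpty_iff, hc]

theorem bRstrip_cons_sp (xs : List Char) :
    bRstrip (' ' :: xs) = if bRstrip xs = [] then [] else ' ' :: bRstrip xs := by
  unfold bRstrip
  rw [List.reverse_cons, List.dropWhile_append]
  by_cases h : (xs.reverse.dropWhile (· == ' ')) = []
  · simp [h, List.isEmpty_iff]
  · simp [h, List.isEmpty_iff]

theorem main_PQ (cs : List Char) :
    (sp1 cs).1 ++ F (sp1 cs).2 = bRstrip (collapse cs false)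
    ∧ F ((sp1 cs).1 :: (sp1 cs).2) = bRstrip (' ' :: collapse cs true) := by
  induction cs with
  | nil => constructor <;> simp [sp1, F, collapse, bRstrip]
  | cons c rest ih =>
    obtain ⟨ihP, ihQ⟩ := ih
    by_cases hc : c = ' '
    · subst hc
      constructor
      · simp only [sp1, if_true, collapse, Bool.and_false]
        rw [if_neg (by simp)]
        simpa using ihQ
      · simp only [sp1, if_true, collapse]
        rw [if_pos (by simp)]
        simpa [F] using ihQ
    · constructor
      · simp only [sp1, hc, if_false, collapse]
        rw [if_neg (by simp [hc])]
        rw [show (c == ' ') = false by simp [hc]]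
        rw [bRstrip_cons_ne c _ hc]
        simpa using ihP
      · simp only [sp1, hc, if_false, collapse]
        rw [if_neg (by simp [hc])]
        rw [show (c == ' ') = false by simp [hc]]
        rw [bRstrip_cons_sp, bRstrip_cons_ne c _ hc]
        rw [if_neg (by simp)]
        simp only [F, ne_eq, List.filter_cons, List.flatMap_cons]
        simp only [F, ne_eq, decide_not] at ihP
        simp [hc, decide_not, ihP]

-- ===== VERDICT (by name: the statement is the Claim_ definition above) =====
theorem get_dir_name_spec : Claim_equal_get_dir_name := by
  intro s _
  unfold Spec_get_dir_name get_dir_name get_dir_name_alt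
  rw [splitOn_eq_sp1, aLoop_zero, bLoop_eq]
  simp only [List.getLast?_nil, List.nil_append]
  rw [show ((none : Option Char) == some ' ') = false from rfl]
  exact congrArg String.mk (main_PQ s.toList).1
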